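-- pv_equiv track=rewrite | github.com/jcomperatore/ProjetProg-Ensae | delivery_network/trucks.py | clean_store
-- ===== SOURCE A (Python) =====
-- def clean_store(store):
--     maxPrice = store[-1][1] + 1
--     clean_store = []
--     for k in range(len(store)-1, -1, -1):
--         if store[k][1] < maxPrice:
--             clean_store.append(store[k])
--             maxPrice = store[k][1]
--     clean_store.reverse()
--     return clean_store
-- ===== SOURCE B (Python) =====
-- def clean_store(store):
--     n = len(store)
--     suffmin = [None] * (n + 1)
--     for i in range(n - 1, -1, -1):
--         m = suffmin[i + 1]
--         p = store[i][1]
--         suffmin[i] = p if (m is None or p < m) else m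
--     return [x for x, m in zip(store, suffmin[1:]) if m is None or x[1] < m]
-- ===== Notes on version B (the rewrite author's own statement) =====
-- stated objective: alternative
-- what changed: Replaces A's single right-to-left loop with a mutable running minimum (plus a final reverse) by a suffix-minimum table built in one reverse pass followed by a stateless forward filter (zip + comprehension) that emits in natural order with no reverse.
-- outside the precondition, e.g. on clean_store([]): A raises IndexError, B returns []
import Mathlib
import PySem

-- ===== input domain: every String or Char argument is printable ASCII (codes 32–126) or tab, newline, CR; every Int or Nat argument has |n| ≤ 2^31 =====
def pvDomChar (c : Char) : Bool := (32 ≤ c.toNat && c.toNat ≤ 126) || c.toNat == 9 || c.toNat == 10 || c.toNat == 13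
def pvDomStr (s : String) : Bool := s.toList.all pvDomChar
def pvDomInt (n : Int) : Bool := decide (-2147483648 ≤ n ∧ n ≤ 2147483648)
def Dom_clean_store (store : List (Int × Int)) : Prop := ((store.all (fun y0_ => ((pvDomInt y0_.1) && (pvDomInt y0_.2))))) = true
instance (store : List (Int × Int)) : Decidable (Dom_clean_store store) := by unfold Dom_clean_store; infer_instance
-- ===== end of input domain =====

-- B replaces A's stateful right-to-left loop + final reverse by a suffix-minimum table
-- plus a stateless forward filter (objective: alternative decomposition, same cost).

-- ===== PORT A =====
-- the loop body of A: read store[k], keep it if strictly cheaper than the running bound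
def cleanStep (store : List (Int × Int)) (st : Int × List (Int × Int)) (k : Int) :
    Int × List (Int × Int) :=
  match PySem.List.pyGet? store k with
  | some x => if x.2 < st.1 then (x.2, st.2 ++ [x]) else st
  | none => st  -- IndexError; unreachable for the indices A generates

def clean_store (store : List (Int × Int)) : List (Int × Int) :=
  match PySem.List.pyGet? store (-1) with
  | none => []  -- store[-1] raises IndexError here; excluded by Pre_
  | some last =>
    let res := (PySem.List.pyRange ((store.length : Int) - 1) (-1) (-1)).foldl
      (cleanStep store) (last.2 + 1, [])
    res.2.reverse

-- ===== PORT B =====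
-- suffMins xs = Python's suffmin table: entry i is the minimum price of xs[i:], none past the end
def suffMins : List (Int × Int) → List (Option Int)
  | [] => [none]
  | x :: xs =>
    let rest := suffMins xs
    (match rest.headD none with
     | none => some x.2
     | some v => some (if x.2 < v then x.2 else v)) :: rest

def clean_store_alt (store : List (Int × Int)) : List (Int × Int) :=
  ((store.zip (suffMins store).tail).filter
    (fun p => match p.2 with | none => true | some v => decide (p.1.2 < v))).map Prod.fst

-- ===== PRECONDITION & SPEC =====
-- Pre_ excludes only the empty list, on which A raises IndexError (store[-1]).
def Pre_clean_store (store : List (Int × Int)) : Prop := store ≠ []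
instance (store : List (Int × Int)) : Decidable (Pre_clean_store store) := by
  unfold Pre_clean_store; infer_instance
def pvWitness_clean_store : (List (Int × Int)) := [(1, 5), (2, 3), (3, 4)]

def Spec_clean_store (store : List (Int × Int)) (out : List (Int × Int)) : Prop :=
  out = clean_store_alt store
instance (store : List (Int × Int)) (out : List (Int × Int)) : Decidable (Spec_clean_store store out) := by
  unfold Spec_clean_store; infer_instance

-- ===== CLAIM (what is proved, stated in full; the proofs are below) =====
def Claim_equal_clean_store : Prop := ∀ (store : List (Int × Int)), Dom_clean_store store →
  Pre_clean_store store → Spec_clean_store store (clean_store store)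

-- ===== LEMMAS AND PROOFS =====

-- A's loop written as a structural right-to-left recursion: (running min, kept in order)
def pvFrec : List (Int × Int) → Int → Int × List (Int × Int)
  | [], M => (M, [])
  | x :: t, M =>
    let s := pvFrec t M
    if x.2 < s.1 then (x.2, x :: s.2) else s

def pvOptmin (xs : List (Int × Int)) : Option Int := (suffMins xs).headD none

theorem suffMins_ne_nil (xs : List (Int × Int)) : suffMins xs ≠ [] := by
  cases xs <;> simp [suffMins]

theorem pvOptmin_nil : pvOptmin [] = none := rfl

theorem pvOptmin_cons (x : Int × Int) (t : List (Int × Int)) :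
    pvOptmin (x :: t) = some (match pvOptmin t with
      | none => x.2
      | some v => if x.2 < v then x.2 else v) := by
  simp only [pvOptmin, suffMins, List.headD_cons]
  cases h : (suffMins t).headD none <;> simp

theorem pvOptmin_le (xs : List (Int × Int)) (v : Int) (a : Int × Int)
    (hv : pvOptmin xs = some v) (ha : a ∈ xs) : v ≤ a.2 := by
  induction xs generalizing v with
  | nil => simp at ha
  | cons x t ih =>
    rw [pvOptmin_cons] at hv
    rcases List.mem_cons.mp ha with h | h
    · subst h
      cases ht : pvOptmin t <;> simp [ht] at hv <;> [omega; (split at hv <;> omega)]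
    · cases ht : pvOptmin t with
      | none => cases t <;> simp_all [pvOptmin_cons]
      | some w =>
        have := ih w ht h
        simp [ht] at hv
        split at hv <;> omega

theorem pvOptmin_isSome (xs : List (Int × Int)) (h : xs ≠ []) : (pvOptmin xs).isSome := by
  cases xs with
  | nil => exact absurd rfl h
  | cons x t => rw [pvOptmin_cons]; rfl

theorem pvFrec_fst (xs : List (Int × Int)) (M : Int) :
    (pvFrec xs M).1 = match pvOptmin xs with
      | none => M
      | some v => if v < M then v else M := by
  induction xs with
  | nil => simp [pvFrec, pvOptmin_nil]
  | cons x t ih =>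
    rw [pvOptmin_cons]
    simp only [pvFrec]
    cases ht : pvOptmin t <;> simp only [ht] at ih ⊢ <;> split_ifs at ih ⊢ <;> omega

-- structural recursion of B's port
theorem alt_nil : clean_store_alt [] = [] := rfl

theorem alt_cons (x : Int × Int) (t : List (Int × Int)) :
    clean_store_alt (x :: t) =
      if (match pvOptmin t with | none => true | some v => decide (x.2 < v))
      then x :: clean_store_alt t else clean_store_alt t := by
  obtain ⟨m, rest, hs⟩ : ∃ m rest, suffMins t = m :: rest := by
    cases h : suffMins t with
    | nil => exact absurd h (suffMins_ne_nil t)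
    | cons m rest => exact ⟨m, rest, rfl⟩
  have hopt : pvOptmin t = m := by simp [pvOptmin, hs]
  simp only [clean_store_alt, suffMins, hs, List.tail_cons, List.zip_cons_cons,
    List.filter_cons, hopt]
  cases m <;> simp <;> split_ifs <;> simp

-- B equals the right-to-left recursion when seeded with last price + 1
theorem pvFrec_cons (x : Int × Int) (t : List (Int × Int)) (M : Int) :
    pvFrec (x :: t) M = if x.2 < (pvFrec t M).1 then (x.2, x :: (pvFrec t M).2) else pvFrec t M :=
  rfl

theorem alt_eq_pvFrec (xs : List (Int × Int)) (l : Int × Int)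
    (h : xs.getLast? = some l) : clean_store_alt xs = (pvFrec xs (l.2 + 1)).2 := by
  induction xs with
  | nil => simp at h
  | cons x t ih =>
    cases t with
    | nil =>
      simp only [List.getLast?_singleton, Option.some.injEq] at h
      subst h
      simp [alt_cons, alt_nil, pvOptmin_nil, pvFrec]
    | cons y t' =>
      have hlast : (y :: t').getLast? = some l := by
        rw [List.getLast?_cons_cons] at h; exact h
      have hmem : l ∈ y :: t' := List.mem_of_getLast? hlast
      obtain ⟨v, hv⟩ := Option.isSome_iff_exists.mp (pvOptmin_isSome (y :: t') (by simp))
      have hvle : v ≤ l.2 := pvOptmin_le _ v l hv hmem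
      have hfst : (pvFrec (y :: t') (l.2 + 1)).1 = v := by
        rw [pvFrec_fst, hv]; simp; omega
      rw [alt_cons, ih hlast, hv, pvFrec_cons x (y :: t') (l.2 + 1), hfst]
      by_cases hx : x.2 < v <;> simp [hx]

-- ===== A-side chain =====
-- the append-accumulating loop body over elements (index already resolved)
def stepApp (st : Int × List (Int × Int)) (x : Int × Int) : Int × List (Int × Int) :=
  if x.2 < st.1 then (x.2, st.2 ++ [x]) else st

def stepC (st : Int × List (Int × Int)) (x : Int × Int) : Int × List (Int × Int) :=
  if x.2 < st.1 then (x.2, x :: st.2) else st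

theorem foldl_idx_eq_rev (xs : List (Int × Int)) (s : Int × List (Int × Int)) :
    (PySem.List.pyRange ((xs.length : Int) - 1) (-1) (-1)).foldl (cleanStep xs) s
      = xs.reverse.foldl stepApp s := by
  induction xs using List.reverseRecOn generalizing s with
  | nil => simp [PySem.List.pyRange_neg_one_eq_nil]
  | append_singleton ys y ih =>
    have hlen : ((ys ++ [y]).length : Int) - 1 = (ys.length : Int) := by simp
    rw [hlen, PySem.List.pyRange_neg_one_cons (by omega)]
    simp only [List.foldl_cons]
    have h1 : cleanStep (ys ++ [y]) s (ys.length : Int) = stepApp s y := by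
      simp [cleanStep, stepApp]
    rw [h1]
    have h2 : ∀ (acc : Int × List (Int × Int)), ∀ k ∈ PySem.List.pyRange ((ys.length : Int) - 1) (-1) (-1),
        cleanStep (ys ++ [y]) acc k = cleanStep ys acc k := by
      intro acc k hk
      rw [PySem.List.mem_pyRange_neg_one] at hk
      have hget : PySem.List.pyGet? (ys ++ [y]) k = PySem.List.pyGet? ys k := by
        rw [PySem.List.pyGet?_of_nonneg _ (by omega),
          PySem.List.pyGet?_of_nonneg _ (by omega)]
        rw [List.getElem?_append_left (by omega)]
      simp [cleanStep, hget]
    rw [PySem.List.foldl_congr_mem _ _ _ _ h2, ih]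
    simp

theorem foldl_app_eq_cons (l : List (Int × Int)) (M : Int) (acc : List (Int × Int)) :
    l.foldl stepApp (M, acc)
      = ((l.foldl stepC (M, acc.reverse)).1, (l.foldl stepC (M, acc.reverse)).2.reverse) := by
  induction l generalizing M acc with
  | nil => simp
  | cons x t ih =>
    simp only [List.foldl_cons, stepApp, stepC]
    split_ifs with h
    · rw [ih]; simp
    · rw [ih]

theorem foldl_rev_eq_pvFrec (xs : List (Int × Int)) (M : Int) (r : List (Int × Int)) :
    xs.reverse.foldl stepC (M, r) = ((pvFrec xs M).1, (pvFrec xs M).2 ++ r) := by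
  induction xs generalizing r with
  | nil => simp [pvFrec]
  | cons x t ih =>
    simp only [List.reverse_cons, List.foldl_append, List.foldl_cons, List.foldl_nil, ih]
    simp only [pvFrec, stepC]
    split_ifs with h <;> simp

theorem clean_eq_pvFrec (xs : List (Int × Int)) (l : Int × Int)
    (h : xs.getLast? = some l) : clean_store xs = (pvFrec xs (l.2 + 1)).2 := by
  unfold clean_store
  rw [PySem.List.pyGet?_neg_one, h]
  simp only
  rw [foldl_idx_eq_rev, foldl_app_eq_cons, foldl_rev_eq_pvFrec]
  simp

-- ===== VERDICT (by name: the statement is the Claim_ definition above) =====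
theorem clean_store_spec : Claim_equal_clean_store := by
  intro store _ hpre
  unfold Spec_clean_store
  obtain ⟨l, hl⟩ := Option.isSome_iff_exists.mp (List.getLast?_isSome.mpr hpre)
  rw [clean_eq_pvFrec store l hl, alt_eq_pvFrec store l hl]
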